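-- pv_equiv track=rewrite | github.com/nishthasharma09/DS-Algo | Queue/test.py | generate
-- ===== SOURCE A (Python) =====
-- def generate(N):
--     numbers = [1]
--     for i in range(N - 1):
--         if numbers[-1] % 10 == 1:
--             lengthOfNumber = len(str(numbers[-1]))
--             numberFormed = '1' + ('0' * lengthOfNumber)
--             numbers.append(int(numberFormed))
--         elif numbers[-1] % 10 == 0:
--             numbers.append(numbers[-1] + 1)
--     return numbers
-- ===== SOURCE B (Python) =====
-- def generate(N):
--     result = []
--     for k in range(N):
--         if k == 0:
--             result.append(1)
--         elif k % 2 == 1: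
--             result.append(10 ** ((k + 1) // 2))
--         else:
--             result.append(10 ** (k // 2) + 1)
--     return result
-- ===== Notes on version B (the rewrite author's own statement) =====
-- stated objective: simpler
-- what changed: Replaces A's stateful loop, which inspects the previous element's final digit and its decimal length via a str()/int() round-trip, with a direct per-index closed form over range(N) (index 0 gives 1, an odd index a power of ten, a later even index a power of ten plus one).
-- intended difference: For N <= 0 A returns [1] because it pre-seeds the list before the loop, while B returns [], the intended empty sequence when no terms are requested. — e.g. on generate(0): A returns [1], B returns []
import Mathlib
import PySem

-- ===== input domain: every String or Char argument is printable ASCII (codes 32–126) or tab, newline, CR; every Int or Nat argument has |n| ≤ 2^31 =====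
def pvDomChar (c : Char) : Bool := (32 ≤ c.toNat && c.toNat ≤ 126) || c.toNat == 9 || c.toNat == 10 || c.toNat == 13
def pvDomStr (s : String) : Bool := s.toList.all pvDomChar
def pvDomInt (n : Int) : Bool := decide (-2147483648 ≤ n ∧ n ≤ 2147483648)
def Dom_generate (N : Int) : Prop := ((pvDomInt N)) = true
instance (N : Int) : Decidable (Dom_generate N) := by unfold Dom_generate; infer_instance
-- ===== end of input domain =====

-- B replaces A's stateful "inspect the last element's last digit and decimal length" loop by a
-- direct closed-form term for each index in range(N) (objective: simpler); for N <= 0 B returns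
-- the empty list where A returns [1], stated below as the intended difference D_generate.


-- ===== PORT A =====
-- hand port of int(s): exact for nonempty pure-digit strings without sign/space/underscore,
-- which is exactly the shape '1' + '0'*k of every string A passes to int()
def pyIntOfDigitChars (s : List Char) : Int :=
  s.foldl (fun a c => a * 10 + ((c.toNat - 48 : Nat) : Int)) 0

-- one iteration of A's loop body (the loop variable i is unused in Python A)
def generateStep (numbers : List Int) : List Int :=
  match PySem.List.pyGet? numbers (-1) with
  | none => numbers  -- unreachable: numbers starts as [1] and never shrinks
  | some last =>
    if PySem.Int.mod last 10 == 1 then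
      -- lengthOfNumber = len(str(numbers[-1]))
      let lengthOfNumber : Int := PySem.Str.len (PySem.Int.toStr last)
      -- numberFormed = '1' + ('0' * lengthOfNumber), kept as List Char
      let numberFormed : List Char := ['1'] ++ PySem.List.pyRepeat ['0'] lengthOfNumber
      numbers ++ [pyIntOfDigitChars numberFormed]
    else if PySem.Int.mod last 10 == 0 then
      numbers ++ [last + 1]
    else numbers

def generate (N : Int) : List Int :=
  (PySem.List.pyRange 0 (N - 1) 1).foldl (fun numbers _ => generateStep numbers) [1]

-- ===== PORT B =====
-- closed-form term for index k; k comes from range(N) so 0 ≤ k and .toNat on the exponent is exact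
def generateTerm (k : Int) : Int :=
  if k == 0 then 1
  else if PySem.Int.mod k 2 == 1 then 10 ^ (PySem.Int.floordiv (k + 1) 2).toNat
  else 10 ^ (PySem.Int.floordiv k 2).toNat + 1

def generate_alt (N : Int) : List Int :=
  (PySem.List.pyRange 0 N 1).foldl (fun result k => result ++ [generateTerm k]) []

-- ===== PRECONDITION & SPEC =====
-- For N <= 0 A returns [1] because it pre-seeds the list before the loop, while B returns [],
-- the intended empty sequence when no terms are requested.
def D_generate (N : Int) : Prop := N ≤ 0
instance (N : Int) : Decidable (D_generate N) := by unfold D_generate; infer_instance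

def Spec_generate (N : Int) (out : List Int) : Prop := ¬ D_generate N → out = generate_alt N
instance (N : Int) (out : List Int) : Decidable (Spec_generate N out) := by unfold Spec_generate; infer_instance

def pvDiffWitness_generate : Int := 0
def pvDiffWitnessOut_generate : (List Int) × (List Int) := ([1], [])

-- ===== CLAIM (what is proved, stated in full; the proofs are below) =====
def Claim_unchanged_generate : Prop := ∀ (N : Int), Dom_generate N → Spec_generate N (generate N)
def Claim_changed_generate : Prop := Dom_generate (pvDiffWitness_generate) ∧ D_generate (pvDiffWitness_generate) ∧ generate (pvDiffWitness_generate) = pvDiffWitnessOut_generate.1 ∧ generate_alt (pvDiffWitness_generate) = pvDiffWitnessOut_generate.2 ∧ pvDiffWitnessOut_generate.1 ≠ pvDiffWitnessOut_generate.2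
def Claim_exact_generate : Prop := ∀ (N : Int), Dom_generate N → D_generate N → generate N ≠ generate_alt N

-- ===== LEMMAS AND PROOFS =====

-- the common closed form, on Nat indices
def pvF (k : Nat) : Nat :=
  if k = 0 then 1 else if k % 2 = 1 then 10 ^ ((k + 1) / 2) else 10 ^ (k / 2) + 1

lemma pvTerm_eq (k : Nat) : generateTerm (k : Int) = (pvF k : Int) := by
  unfold generateTerm pvF
  rcases Nat.eq_zero_or_pos k with hk | hk
  · subst hk; decide
  · have h0 : ((k : Int) == 0) = false := by simp; omega
    rw [h0]
    simp only [Bool.false_eq_true, if_false]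
    have hm : PySem.Int.mod (k : Int) 2 = ((k % 2 : Nat) : Int) := by
      simpa using PySem.Int.mod_natCast k 2
    have hf1 : PySem.Int.floordiv ((k : Int) + 1) 2 = (((k + 1) / 2 : Nat) : Int) := by
      have := PySem.Int.floordiv_natCast (k + 1) 2
      simpa using this
    have hf2 : PySem.Int.floordiv (k : Int) 2 = ((k / 2 : Nat) : Int) := by
      simpa using PySem.Int.floordiv_natCast k 2
    rw [hm, hf1, hf2]
    rcases Nat.even_or_odd k with he | ho
    · have h2 : k % 2 = 0 := Nat.even_iff.mp he
      rw [show (((k % 2 : Nat) : Int) == 1) = false by simp [h2]]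
      simp only [Bool.false_eq_true, if_false]
      rw [Int.toNat_natCast, if_neg hk.ne', if_neg (by omega)]
      push_cast
      ring
    · have h2 : k % 2 = 1 := Nat.odd_iff.mp ho
      rw [show (((k % 2 : Nat) : Int) == 1) = true by simp [h2]]
      simp only [if_true]
      rw [Int.toNat_natCast, if_neg hk.ne', if_pos h2]
      push_cast
      ring

lemma pv_alt_eq (N : Int) :
    generate_alt N = (List.range N.toNat).map (fun k => (pvF k : Int)) := by
  unfold generate_alt
  rw [PySem.List.pyRange_one]
  rw [PySem.List.foldl_append_singleton_eq_map]
  simp [List.map_map, Function.comp, pvTerm_eq]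

-- length of Nat.toDigits 10 n is log₁₀ n + 1 (fuel-generic core lemma)
lemma pvTDC_len : ∀ (f n : Nat) (l : List Char), n ≤ f →
    (Nat.toDigitsCore 10 (f + 1) n l).length = Nat.log 10 n + 1 + l.length := by
  intro f
  induction f with
  | zero =>
    intro n l hn
    interval_cases n
    simp [Nat.toDigitsCore]
    omega
  | succ f ih =>
    intro n l hn
    rw [Nat.toDigitsCore]
    by_cases h : n / 10 = 0
    · have hlt : n < 10 := by omega
      have : Nat.log 10 n = 0 := Nat.log_eq_zero_iff.mpr (Or.inl hlt)
      simp [h, this]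
      omega
    · have h10 : 10 ≤ n := by
        by_contra hc
        exact h (Nat.div_eq_of_lt (by omega))
      rw [if_neg h]
      have hle : n / 10 ≤ f := by
        have := Nat.div_lt_self (by omega : 0 < n) (by omega : 1 < 10)
        omega
      rw [ih (n / 10) _ hle]
      have hpos : 0 < Nat.log 10 n := Nat.log_pos (by omega) h10
      have := Nat.log_div_base 10 n
      simp only [List.length_cons]
      omega

lemma pvToDigits_len (n : Nat) : (Nat.toDigits 10 n).length = Nat.log 10 n + 1 := by
  have := pvTDC_len n n [] le_rfl
  simpa [Nat.toDigits] using this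

lemma pvLog_pow_add_one (j : Nat) : Nat.log 10 (10 ^ j + 1) = j := by
  apply Nat.log_eq_of_pow_le_of_lt_pow
  · omega
  · have h1 : 1 ≤ 10 ^ j := Nat.one_le_pow _ _ (by omega)
    rw [pow_succ]
    omega

lemma pvFold_zeros (L : Nat) : ∀ a : Int,
    (List.replicate L '0').foldl (fun a c => a * 10 + ((c.toNat - 48 : Nat) : Int)) a
      = a * 10 ^ L := by
  induction L with
  | zero => intro a; simp
  | succ L ih =>
    intro a
    rw [List.replicate_succ, List.foldl_cons, ih]
    have : (('0'.toNat - 48 : Nat) : Int) = 0 := by decide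
    rw [this]
    ring

lemma pvIntOfOnePadded (L : Nat) :
    pyIntOfDigitChars ('1' :: List.replicate L '0') = ((10 ^ L : Nat) : Int) := by
  unfold pyIntOfDigitChars
  rw [List.foldl_cons, pvFold_zeros]
  have : ((('1'.toNat - 48 : Nat)) : Int) = 1 := by decide
  rw [this]
  push_cast
  ring

-- length of str(10^j + 1) as PySem sees it
lemma pvStrLen (j : Nat) :
    PySem.Str.len (PySem.Int.toStr ((10 ^ j + 1 : Nat) : Int)) = ((j + 1 : Nat) : Int) := by
  rw [PySem.Str.len_eq, PySem.Int.toList_toStr]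
  unfold PySem.Int.toChars
  rw [if_neg (not_lt.mpr (Int.natCast_nonneg (10 ^ j + 1)))]
  rw [Int.toNat_natCast, pvToDigits_len, pvLog_pow_add_one]

-- one step of A carries map pvF (range (m+1)) to map pvF (range (m+2))
lemma pvStepKey (m : Nat) :
    generateStep ((List.range (m + 1)).map (fun k => (pvF k : Int)))
      = (List.range (m + 2)).map (fun k => (pvF k : Int)) := by
  have hlast : PySem.List.pyGet? ((List.range (m + 1)).map (fun k => (pvF k : Int))) (-1)
      = some ((pvF m : Nat) : Int) := by
    rw [PySem.List.pyGet?_neg_one, List.range_succ, List.map_append]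
    simp
  unfold generateStep
  rw [hlast]
  simp only []
  rcases Nat.eq_zero_or_pos m with hm | hm
  · subst hm; decide
  · have hmod : PySem.Int.mod ((pvF m : Nat) : Int) 10 = ((pvF m % 10 : Nat) : Int) := by
      simpa using PySem.Int.mod_natCast (pvF m) 10
    rcases Nat.even_or_odd m with he | ho
    · -- m even, m > 0 : last = 10^j + 1 ends in 1
      obtain ⟨j, rfl⟩ := he
      have hj : 1 ≤ j := by omega
      have hfv : pvF (j + j) = 10 ^ j + 1 := by
        unfold pvF
        rw [if_neg (by omega), if_neg (by omega)]
        congr 1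
        congr 1
        omega
      have hdvd : 10 ∣ 10 ^ j := dvd_pow_self 10 (by omega)
      obtain ⟨c, hc⟩ := hdvd
      have hmod1 : pvF (j + j) % 10 = 1 := by rw [hfv, hc]; omega
      rw [hmod, hmod1]
      have : (((1 : Nat) : Int) == 1) = true := by decide
      rw [this]
      simp only [if_true]
      rw [hfv, pvStrLen]
      have hrep : PySem.List.pyRepeat ['0'] ((j + 1 : Nat) : Int)
          = List.replicate (j + 1) '0' := by
        rw [PySem.List.pyRepeat_singleton]
        simp
      rw [hrep]
      have hone : (['1'] ++ List.replicate (j + 1) '0') = '1' :: List.replicate (j + 1) '0' := rfl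
      rw [hone, pvIntOfOnePadded]
      have helem : ((10 ^ (j + 1) : Nat) : Int) = ((pvF (j + j + 1) : Nat) : Int) := by
        unfold pvF
        rw [if_neg (by omega), if_pos (by omega), show (j + j + 1 + 1) / 2 = j + 1 by omega]
      conv_rhs => rw [show j + j + 2 = (j + j + 1) + 1 from rfl, List.range_succ, List.map_append]
      rw [helem]
      simp
    · -- m odd : last = 10^((m+1)/2) ends in 0
      obtain ⟨j, rfl⟩ := ho
      have hfv : pvF (2 * j + 1) = 10 ^ (j + 1) := by
        unfold pvF
        rw [if_neg (by omega), if_pos (by omega)]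
        congr 1
        omega
      have hdvd : 10 ∣ 10 ^ (j + 1) := dvd_pow_self 10 (by omega)
      obtain ⟨c, hc⟩ := hdvd
      have hmod0 : pvF (2 * j + 1) % 10 = 0 := by rw [hfv, hc]; omega
      rw [hmod, hmod0]
      have h1 : (((0 : Nat) : Int) == 1) = false := by decide
      have h0 : (((0 : Nat) : Int) == 0) = true := by decide
      rw [h1]
      simp only [Bool.false_eq_true, if_false]
      rw [h0]
      simp only [if_true]
      have helem : ((pvF (2 * j + 1) : Nat) : Int) + 1 = ((pvF (2 * j + 1 + 1) : Nat) : Int) := by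
        rw [hfv]
        conv_rhs => unfold pvF
        rw [if_neg (by omega), if_neg (by omega), show (2 * j + 1 + 1) / 2 = j + 1 by omega]
        push_cast
        ring
      conv_rhs => rw [show (2 * j + 1) + 2 = ((2 * j + 1) + 1) + 1 from rfl, List.range_succ, List.map_append]
      rw [helem]
      simp [show 2 * j + 1 + 1 = 2 * j + 2 from rfl]

lemma pvIterA (m : Nat) :
    (List.range m).foldl (fun ns _ => generateStep ns) [1]
      = (List.range (m + 1)).map (fun k => (pvF k : Int)) := by
  induction m with
  | zero => decide
  | succ m ih =>
    rw [List.range_succ, List.foldl_append, ih]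
    simpa using pvStepKey m

lemma pvA_neg (N : Int) (h : N ≤ 0) : generate N = [1] := by
  unfold generate
  rw [PySem.List.pyRange_one]
  rw [show (N - 1 - 0).toNat = 0 by omega]
  rfl

-- ===== VERDICT (by name: the statements are the Claim_ definitions above) =====
theorem generate_spec : Claim_unchanged_generate := by
  intro N _ hD
  show generate N = generate_alt N
  have hN : 1 ≤ N := by
    unfold D_generate at hD
    omega
  rw [pv_alt_eq]
  unfold generate
  rw [PySem.List.pyRange_one]
  rw [List.foldl_map]
  rw [pvIterA]
  congr 2
  omega

theorem generate_changed : Claim_changed_generate := by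
  unfold Claim_changed_generate; decide

theorem generate_tight : Claim_exact_generate := by
  intro N _ hD
  rw [pvA_neg N hD, pv_alt_eq]
  rw [show N.toNat = 0 by unfold D_generate at hD; omega]
  decide
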